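-- pv_equiv track=rewrite | github.com/amathebest/DSP | vigenere.py | kaziskiEstimation
-- ===== SOURCE A (Python) =====
-- from collections import Counter
--
-- def kaziskiEstimation(cyphertext):
--     kaziskiDistances = []
--     dist_matrix = []
--     count = Counter()
--     # finding trigrams
--     trigrams = []
--     for i in range(len(cyphertext)):
--         if i < len(cyphertext)-2:
--             new_trigram = cyphertext[i]+cyphertext[i+1]+cyphertext[i+2]
--             trigrams.append(new_trigram)
--     # counting each occurrence
--     for trigram in trigrams:
--         count[trigram] += 1
--     # finding the distances
--     for elem in count:
--         if count[elem] > 1: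
--             row = []
--             row.append(elem)
--             for i in range(len(cyphertext)):
--                 if i < len(cyphertext)-2:
--                     if elem == cyphertext[i:i+3]:
--                         row.append(i)
--             dist_matrix.append(row)
--     # saving the distances in the return matrix
--     for elem in dist_matrix:
--         for i in range(len(elem)-2):
--             dist = elem[i+2] - elem[i+1]
--             kaziskiDistances.append(dist)
--     return kaziskiDistances
-- ===== SOURCE B (Python) =====
-- def kaziskiEstimation(cyphertext):
--     # One pass: trigram -> list of its positions; then consecutive differences.
--     positions = {}
--     for i in range(len(cyphertext) - 2):
--         positions.setdefault(cyphertext[i:i+3], []).append(i)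
--     kaziskiDistances = []
--     for ps in positions.values():
--         for prev, nxt in zip(ps, ps[1:]):
--             kaziskiDistances.append(nxt - prev)
--     return kaziskiDistances
-- ===== Notes on version B (the rewrite author's own statement) =====
-- stated objective: faster
-- what changed: Replaces the per-repeated-trigram rescan of the whole ciphertext with a single pass that builds a dict trigram -> position list, then emits consecutive differences per list.
import Mathlib
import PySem

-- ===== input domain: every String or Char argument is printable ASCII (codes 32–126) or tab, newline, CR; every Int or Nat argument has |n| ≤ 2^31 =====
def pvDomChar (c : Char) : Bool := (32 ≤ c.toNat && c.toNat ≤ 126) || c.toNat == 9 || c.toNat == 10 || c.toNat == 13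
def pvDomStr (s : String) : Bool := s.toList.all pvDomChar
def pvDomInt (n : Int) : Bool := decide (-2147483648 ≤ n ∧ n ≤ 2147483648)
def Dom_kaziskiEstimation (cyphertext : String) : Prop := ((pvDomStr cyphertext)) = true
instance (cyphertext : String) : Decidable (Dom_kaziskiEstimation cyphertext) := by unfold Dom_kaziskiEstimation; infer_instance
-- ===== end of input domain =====

-- B replaces A's per-repeated-trigram rescan of the whole ciphertext by one pass building a
-- dict trigram -> position list, then consecutive differences per list (objective: faster).

-- ===== PORT A =====
-- Python strings are modelled as List Char; a trigram is its 3-char list.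
def kaziskiEstimation (cyphertext : String) : List Int :=
  let cs := cyphertext.toList
  let n : Int := (cs.length : Int)
  -- finding trigrams: cyphertext[i]+cyphertext[i+1]+cyphertext[i+2] (indices in range under the guard, so pyGetD's default is never used)
  let trigrams : List (List Char) :=
    (PySem.List.pyRange 0 n 1).foldl (fun acc i =>
      if i < n - 2 then
        acc ++ [[PySem.List.pyGetD cs i ' ', PySem.List.pyGetD cs (i + 1) ' ', PySem.List.pyGetD cs (i + 2) ' ']]
      else acc) []
  -- counting each occurrence: count[trigram] += 1
  let count : PySem.Dict (List Char) Int :=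
    trigrams.foldl (fun d t => d.modify t 0 (· + 1)) PySem.Dict.empty
  -- finding the distances; Python's row is [elem] ++ positions, stored here as (elem, positions)
  let distMatrix : List (List Char × List Int) :=
    count.keys.foldl (fun m elem =>
      if count.getD elem 0 > 1 then
        let row : List Int :=
          (PySem.List.pyRange 0 n 1).foldl (fun r i =>
            if i < n - 2 then
              if elem == PySem.List.slice cs (some i) (some (i + 3)) then r ++ [i] else r
            else r) []
        m ++ [(elem, row)]
      else m) []
  -- saving the distances; Python's row[i+2] - row[i+1] is positions[i+1] - positions[i] (row[0] is the trigram)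
  distMatrix.foldl (fun acc r =>
    (PySem.List.pyRange 0 ((1 + (r.2.length : Int)) - 2) 1).foldl (fun acc i =>
      acc ++ [PySem.List.pyGetD r.2 (i + 1) 0 - PySem.List.pyGetD r.2 i 0]) acc) []

-- ===== PORT B =====
def kaziskiEstimation_alt (cyphertext : String) : List Int :=
  let cs := cyphertext.toList
  let n : Int := (cs.length : Int)
  -- positions.setdefault(cyphertext[i:i+3], []).append(i): d[t] = d.get(t, []) + [i]
  let positions : PySem.Dict (List Char) (List Int) :=
    (PySem.List.pyRange 0 (n - 2) 1).foldl (fun d i =>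
      d.modify (PySem.List.slice cs (some i) (some (i + 3))) [] (· ++ [i])) PySem.Dict.empty
  positions.values.foldl (fun acc ps =>
    acc ++ ((ps.zip (PySem.List.slice ps (some 1) none)).map (fun p => p.2 - p.1)) ) []

-- ===== PRECONDITION & SPEC =====
def Spec_kaziskiEstimation (cyphertext : String) (out : List Int) : Prop := out = kaziskiEstimation_alt cyphertext
instance (cyphertext : String) (out : List Int) : Decidable (Spec_kaziskiEstimation cyphertext out) := by unfold Spec_kaziskiEstimation; infer_instance

-- ===== CLAIM (what is proved, stated in full; the proofs are below) =====
def Claim_equal_kaziskiEstimation : Prop := ∀ (cyphertext : String), Dom_kaziskiEstimation cyphertext → Spec_kaziskiEstimation cyphertext (kaziskiEstimation cyphertext)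

-- ===== LEMMAS AND PROOFS =====

-- the trigram starting at position i, and the list of start positions of trigram t
def trigAt (cs : List Char) (i : Int) : List Char := PySem.List.slice cs (some i) (some (i + 3))

def occAt (cs : List Char) (t : List Char) : List Int :=
  (PySem.List.pyRange 0 ((cs.length : Int) - 2) 1).filter (fun i => trigAt cs i == t)

def diffsOf (ps : List Int) : List Int :=
  (PySem.List.pyRange 0 ((1 + (ps.length : Int)) - 2) 1).map
    (fun i => PySem.List.pyGetD ps (i + 1) 0 - PySem.List.pyGetD ps i 0)

theorem beq_swap {α : Type} [BEq α] [LawfulBEq α] (a b : α) : (a == b) = (b == a) := by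
  by_cases h : a = b
  · simp [h]
  · simp [h, Ne.symm h]

theorem filter_lt_pyRange (n : Int) (q : Int → Bool) :
    (PySem.List.pyRange 0 n 1).filter (fun i => decide (i < n - 2) && q i)
      = (PySem.List.pyRange 0 (n - 2) 1).filter q := by
  by_cases h : n ≤ 2
  · have h1 : PySem.List.pyRange 0 (n - 2) 1 = [] := PySem.List.pyRange_one_eq_nil (by omega)
    rw [h1, List.filter_nil]
    apply List.filter_eq_nil_iff.mpr
    intro i hi
    have hm := PySem.List.mem_pyRange_one.mp hi
    have hx : ¬ (i < n - 2) := by omega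
    simp [hx]
  · rw [PySem.List.pyRange_one_append 0 (n - 2) n (by omega) (by omega), List.filter_append]
    have e2 : (PySem.List.pyRange (n - 2) n 1).filter (fun i => decide (i < n - 2) && q i) = [] := by
      apply List.filter_eq_nil_iff.mpr
      intro i hi
      have hm := PySem.List.mem_pyRange_one.mp hi
      have hx : ¬ (i < n - 2) := by omega
      simp [hx]
    rw [e2, List.append_nil]
    apply List.filter_congr
    intro i hi
    have hm := PySem.List.mem_pyRange_one.mp hi
    have hx : i < n - 2 := hm.2
    simp [hx]

theorem trig_chars (cs : List Char) (i : Int) (h0 : 0 ≤ i) (h2 : i < (cs.length : Int) - 2) :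
    [PySem.List.pyGetD cs i ' ', PySem.List.pyGetD cs (i + 1) ' ', PySem.List.pyGetD cs (i + 2) ' ']
      = trigAt cs i := by
  obtain ⟨k, rfl⟩ : ∃ k : Nat, (k : Int) = i := ⟨i.toNat, Int.toNat_of_nonneg h0⟩
  have e1 : ((k : Int) + 1) = ((k + 1 : Nat) : Int) := by push_cast; ring
  have e2 : ((k : Int) + 2) = ((k + 2 : Nat) : Int) := by push_cast; ring
  have e3 : ((k : Int) + 3) = ((k + 3 : Nat) : Int) := by push_cast; ring
  unfold trigAt
  rw [e1, e2, e3, PySem.List.pyGetD_natCast, PySem.List.pyGetD_natCast, PySem.List.pyGetD_natCast,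
    PySem.List.slice_natCast]
  have ht : k + 3 - k = 3 := by omega
  rw [ht]
  rw [List.drop_eq_getElem_cons (by omega : k < cs.length)]
  rw [List.drop_eq_getElem_cons (by omega : k + 1 < cs.length)]
  rw [List.drop_eq_getElem_cons (by omega : k + 1 + 1 < cs.length)]
  rw [List.getD_eq_getElem cs ' ' (by omega : k < cs.length),
    List.getD_eq_getElem cs ' ' (by omega : k + 1 < cs.length),
    List.getD_eq_getElem cs ' ' (by omega : k + 2 < cs.length)]
  rfl

theorem diffs_nil (ps : List Int) (h : ps.length ≤ 1) : diffsOf ps = [] := by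
  unfold diffsOf
  rw [PySem.List.pyRange_one_eq_nil (by omega)]
  rfl

theorem diffs_eq (ps : List Int) :
    diffsOf ps = (ps.zip (PySem.List.slice ps (some 1) none)).map (fun p => p.2 - p.1) := by
  rw [PySem.List.slice_from_one]
  unfold diffsOf
  rcases ps with _ | ⟨a, l⟩
  · decide
  · have hl : (1 + (((a :: l).length : Nat) : Int)) - 2 = ((l.length : Nat) : Int) := by
      simp only [List.length_cons]; push_cast; ring
    rw [hl, PySem.List.pyRange_zero_natCast, List.map_map, List.tail_cons]
    apply List.ext_getElem
    · simp only [List.length_map, List.length_range, List.length_zip, List.length_cons]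
      omega
    · intro j h1 h2
      have hj : j < l.length := by
        simpa using h1
      simp only [List.getElem_map, List.getElem_range, List.getElem_zip, Function.comp]
      have e1 : ((j : Nat) : Int) + 1 = ((j + 1 : Nat) : Int) := by push_cast; ring
      rw [e1, PySem.List.pyGetD_natCast, PySem.List.pyGetD_natCast,
        List.getD_eq_getElem _ _ (by simp; omega : j + 1 < (a :: l).length),
        List.getD_eq_getElem _ _ (by simp; omega : j < (a :: l).length)]
      simp

theorem flatMap_filter {α β : Type} (l : List α) (p : α → Bool) (f : α → List β)
    (h : ∀ x ∈ l, p x = false → f x = []) :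
    (l.filter p).flatMap f = l.flatMap f := by
  induction l with
  | nil => rfl
  | cons x xs ih =>
    have ih' := ih (fun y hy hpy => h y (List.mem_cons_of_mem _ hy) hpy)
    cases hp : p x with
    | false =>
      rw [List.filter_cons_of_neg (by simp [hp]), List.flatMap_cons,
        h x (by simp) hp, List.nil_append, ih']
    | true =>
      rw [List.filter_cons_of_pos (by simp [hp]), List.flatMap_cons, List.flatMap_cons, ih']

theorem count_occ (cs : List Char) (t : List Char) :
    List.count t ((PySem.List.pyRange 0 ((cs.length : Int) - 2) 1).map (trigAt cs))
      = (occAt cs t).length := by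
  unfold occAt
  rw [List.count_eq_countP, List.countP_map, List.countP_eq_length_filter]
  rfl

-- A's trigram-building loop produces exactly the slices at positions 0 .. n-3
theorem tri_eq (cs : List Char) :
    (PySem.List.pyRange 0 (cs.length : Int) 1).foldl (fun acc i =>
        if i < (cs.length : Int) - 2 then
          acc ++ [[PySem.List.pyGetD cs i ' ', PySem.List.pyGetD cs (i + 1) ' ', PySem.List.pyGetD cs (i + 2) ' ']]
        else acc) []
      = (PySem.List.pyRange 0 ((cs.length : Int) - 2) 1).map (trigAt cs) := by
  rw [PySem.List.foldl_append_ite (p := fun i => i < (cs.length : Int) - 2), List.nil_append]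
  have hq : (fun i => decide (i < (cs.length : Int) - 2))
      = (fun i => decide (i < (cs.length : Int) - 2) && (fun _ : Int => true) i) := by
    funext i; simp
  rw [hq, filter_lt_pyRange, List.filter_true]
  exact List.map_congr_left (fun i hi => by
    have hm := PySem.List.mem_pyRange_one.mp hi
    exact trig_chars cs i hm.1 hm.2)

-- A's inner rescan for one repeated trigram collects exactly its occurrence positions
theorem row_eq (cs : List Char) (e : List Char) :
    (PySem.List.pyRange 0 (cs.length : Int) 1).foldl (fun r i =>
        if i < (cs.length : Int) - 2 then
          if e == PySem.List.slice cs (some i) (some (i + 3)) then r ++ [i] else r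
        else r) []
      = occAt cs e := by
  rw [PySem.List.foldl_congr_mem _ _
    (fun r i => if (decide (i < (cs.length : Int) - 2) && (e == PySem.List.slice cs (some i) (some (i + 3)))) then r ++ [i] else r) _
    (by
      intro r i _
      by_cases h1 : i < (cs.length : Int) - 2 <;> simp [h1])]
  rw [PySem.List.foldl_append_if_eq_filter, List.nil_append, filter_lt_pyRange]
  unfold occAt
  exact List.filter_congr (fun i _ => beq_swap e (trigAt cs i))

theorem port_eq (c : String) : kaziskiEstimation c = kaziskiEstimation_alt c := by
  unfold kaziskiEstimation kaziskiEstimation_alt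
  dsimp only
  generalize c.toList = cs
  rw [tri_eq cs]
  rw [← PySem.Dict.counter_eq_foldl]
  -- name the two dictionaries
  set T : List (List Char) := (PySem.List.pyRange 0 ((cs.length : Int) - 2) 1).map (trigAt cs) with hT
  set P : PySem.Dict (List Char) (List Int) :=
    (PySem.List.pyRange 0 ((cs.length : Int) - 2) 1).foldl (fun d i =>
      d.modify (PySem.List.slice cs (some i) (some (i + 3))) [] (· ++ [i])) PySem.Dict.empty with hP
  -- B's dict: keys, nodup, contents
  have hPkeys : P.keys = PySem.Set.ofList T := by
    have h := PySem.Dict.keys_foldl_modify_key (PySem.List.pyRange 0 ((cs.length : Int) - 2) 1)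
      (fun i => PySem.List.slice cs (some i) (some (i + 3))) [] (fun _ i v => v ++ [i]) PySem.Dict.empty
    rw [hP]
    simpa [PySem.Dict.keys_empty, PySem.Set.update_nil_left, hT, trigAt] using h
  have hPnodup : P.keys.Nodup := by
    rw [hPkeys]; exact PySem.Set.nodup_ofList T
  have hPget : ∀ t, P.getD t [] = occAt cs t := by
    intro t
    have h1 : P = ((PySem.List.pyRange 0 ((cs.length : Int) - 2) 1).map (fun i => (trigAt cs i, i))).foldl
        (fun d p => d.modify p.1 [] (· ++ [p.2])) PySem.Dict.empty := by
      rw [hP, List.foldl_map]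
      rfl
    rw [h1, PySem.Dict.getD_foldl_modify_append, PySem.Dict.getD_empty, List.nil_append]
    simp [List.filter_map, Function.comp_def, occAt]
  -- A's saving loop: row -> consecutive differences
  rw [PySem.List.foldl_congr_mem _ _ (fun acc (r : List Char × List Int) => acc ++ diffsOf r.2) _
    (by
      intro acc r _
      rw [PySem.List.foldl_append_singleton_eq_map]
      rfl)]
  -- A's dist_matrix loop
  rw [PySem.List.foldl_append_ite (p := fun elem => (PySem.Dict.counter T).getD elem 0 > 1)
    (f := fun elem => (elem,
      (PySem.List.pyRange 0 (cs.length : Int) 1).foldl (fun r i =>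
        if i < (cs.length : Int) - 2 then
          if elem == PySem.List.slice cs (some i) (some (i + 3)) then r ++ [i] else r
        else r) [])), List.nil_append]
  rw [PySem.List.foldl_append_eq_flatMap, List.nil_append, List.flatMap_map]
  simp only [row_eq cs]
  -- B's output loop
  rw [PySem.List.foldl_append_eq_flatMap, List.nil_append,
    PySem.Dict.values_eq_map_keys P hPnodup [], List.flatMap_map]
  simp only [hPget, ← diffs_eq, hPkeys, PySem.Dict.keys_counter]
  -- drop the count > 1 filter: unrepeated trigrams contribute no distance
  apply flatMap_filter
  intro t _ hfalse
  apply diffs_nil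
  have hc : ¬ ((PySem.Dict.counter T).getD t 0 > 1) := by
    simpa using hfalse
  rw [PySem.Dict.getD_counter] at hc
  rw [hT] at hc
  rw [count_occ cs t] at hc
  omega

-- ===== VERDICT (by name: the statement is the Claim_ definition above) =====
theorem kaziskiEstimation_spec : Claim_equal_kaziskiEstimation := by
  intro c _
  exact port_eq c
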